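-- pv_equiv track=rewrite | github.com/Midhilesh4890/Leetcode-Problems | Google/Onsite/AddressTrie.py | generate_wildcard_variations
-- ===== SOURCE A (Python) =====
-- def generate_wildcard_variations(address):
--     """Generate all possible wildcard variations using bitwise operations."""
--     variations = set()
--     n = len(address)
--
--     # Iterate over all 2^n bit patterns
--     for mask in range(1 << n):  # 2^n combinations
--         temp = list(address)
--         for i in range(n):
--             if mask & (1 << i):  # If the i-th bit is set, replace with "null"
--                 temp[i] = "null"
--         variations.add(tuple(temp))
--
--     return variations
-- ===== SOURCE B (Python) =====
-- def generate_wildcard_variations(address):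
--     """Generate all possible wildcard variations by structural recursion
--     (Cartesian product of the two options per position), no bitmasks."""
--     def build(addr):
--         if not addr:
--             return [()]
--         rest = build(addr[1:])
--         return [(opt,) + v for v in rest for opt in (addr[0], "null")]
--     return set(build(list(address)))
-- ===== Notes on version B (the rewrite author's own statement) =====
-- stated objective: idiomatic
-- what changed: Replaced the 2^n bitmask enumeration with an inner per-bit replacement loop by a structural recursion that builds the Cartesian product [address[i],'null'] per position directly, with no masks and no index arithmetic.
import Mathlib
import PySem

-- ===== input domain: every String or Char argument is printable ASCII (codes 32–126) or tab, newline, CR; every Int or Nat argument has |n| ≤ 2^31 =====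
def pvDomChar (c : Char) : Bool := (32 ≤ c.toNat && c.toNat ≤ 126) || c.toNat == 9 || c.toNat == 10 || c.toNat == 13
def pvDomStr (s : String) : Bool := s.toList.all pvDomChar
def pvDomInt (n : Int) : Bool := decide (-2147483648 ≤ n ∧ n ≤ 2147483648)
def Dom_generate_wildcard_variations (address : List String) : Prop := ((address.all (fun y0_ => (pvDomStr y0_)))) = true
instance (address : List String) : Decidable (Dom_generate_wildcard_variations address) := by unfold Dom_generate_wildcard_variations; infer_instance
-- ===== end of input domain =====

-- B replaces A's 2^n bitmask double loop by a structural recursion producing the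
-- per-position Cartesian product {address[i], "null"} directly (idiomatic, no masks).

-- ===== PORT A =====
-- inner loop of A: temp = list(address); for i in range(n): if mask & (1 << i): temp[i] = "null"
def pvTemp (mask : Nat) (addr : List String) : List String :=
  (List.range addr.length).foldl
    (fun temp i => if mask &&& (1 <<< i) ≠ 0 then temp.set i "null" else temp) addr

def generate_wildcard_variations (address : List String) : List (List String) :=
  let n := address.length
  (List.range (1 <<< n)).foldl
    (fun variations mask => PySem.Set.add variations (pvTemp mask address))
    PySem.Set.empty

-- ===== PORT B =====
-- build(addr): [()] if empty, else [(opt,)+v for v in build(addr[1:]) for opt in (addr[0],"null")]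
def pvBuild (address : List String) : List (List String) :=
  match address with
  | [] => [[]]
  | x :: rest => (pvBuild rest).flatMap (fun v => [x :: v, "null" :: v])

def generate_wildcard_variations_alt (address : List String) : List (List String) :=
  PySem.Set.ofList (pvBuild address)

-- ===== PRECONDITION & SPEC =====
def Spec_generate_wildcard_variations (address : List String) (out : List (List String)) : Prop := out = generate_wildcard_variations_alt address
instance (address : List String) (out : List (List String)) : Decidable (Spec_generate_wildcard_variations address out) := by unfold Spec_generate_wildcard_variations; infer_instance

-- ===== CLAIM (what is proved, stated in full; the proofs are below) =====
def Claim_equal_generate_wildcard_variations : Prop := ∀ (address : List String), Dom_generate_wildcard_variations address → Spec_generate_wildcard_variations address (generate_wildcard_variations address)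

-- ===== LEMMAS AND PROOFS =====

-- mask & (1 << (i+1)) tests the same bit as (mask >> 1) & (1 << i)
theorem pvBit_shift (mask i : Nat) :
    ((mask &&& (1 <<< (i + 1)) ≠ 0)) ↔ ((mask >>> 1) &&& (1 <<< i) ≠ 0) := by
  simp [Nat.one_shiftLeft, Nat.and_two_pow, Nat.shiftRight_succ, Nat.shiftRight_zero,
    Nat.testBit_add_one]

-- folding set-updates over shifted indices leaves the head untouched
theorem pvFold_shift (mask : Nat) (l : List Nat) (h : String) (t : List String) :
    l.foldl (fun temp i => if mask &&& (1 <<< (i + 1)) ≠ 0 then temp.set (i + 1) "null" else temp) (h :: t)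
    = h :: l.foldl (fun temp i => if (mask >>> 1) &&& (1 <<< i) ≠ 0 then temp.set i "null" else temp) t := by
  induction l generalizing h t with
  | nil => rfl
  | cons i l ih =>
    simp only [List.foldl_cons, List.set_cons_succ]
    by_cases hb : mask &&& (1 <<< (i + 1)) ≠ 0
    · rw [if_pos hb, if_pos ((pvBit_shift mask i).mp hb), ih]
    · rw [if_neg hb, if_neg (fun hc => hb ((pvBit_shift mask i).mpr hc)), ih]

theorem pvTemp_cons (mask : Nat) (x : String) (rest : List String) :
    pvTemp mask (x :: rest)
    = (if mask % 2 = 1 then "null" else x) :: pvTemp (mask >>> 1) rest := by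
  unfold pvTemp
  rw [show (x :: rest).length = rest.length + 1 from rfl, List.range_succ_eq_map,
    List.foldl_cons, List.foldl_map]
  have h0 : (mask &&& (1 <<< 0) ≠ 0) ↔ mask % 2 = 1 := by
    simp [Nat.and_one_is_mod]
  by_cases hb : mask % 2 = 1
  · rw [if_pos (h0.mpr hb), if_pos hb, List.set_cons_zero]
    exact pvFold_shift mask (List.range rest.length) "null" rest
  · rw [if_neg (fun hc => hb (h0.mp hc)), if_neg hb]
    exact pvFold_shift mask (List.range rest.length) x rest

theorem pvTemp_even (q : Nat) (x : String) (rest : List String) :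
    pvTemp (2 * q) (x :: rest) = x :: pvTemp q rest := by
  rw [pvTemp_cons]
  have h1 : (2 * q) % 2 = 0 := by omega
  have h2 : (2 * q) >>> 1 = q := by rw [Nat.shiftRight_one]; omega
  rw [h1, h2]; simp

theorem pvTemp_odd (q : Nat) (x : String) (rest : List String) :
    pvTemp (2 * q + 1) (x :: rest) = "null" :: pvTemp q rest := by
  rw [pvTemp_cons]
  have h1 : (2 * q + 1) % 2 = 1 := by omega
  have h2 : (2 * q + 1) >>> 1 = q := by rw [Nat.shiftRight_one]; omega
  rw [h1, h2]; simp

-- range(2m) enumerated as pairs (2q, 2q+1)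
theorem pvRange_double (m : Nat) :
    List.range (2 * m) = (List.range m).flatMap (fun q => [2 * q, 2 * q + 1]) := by
  induction m with
  | zero => rfl
  | succ m ih =>
    rw [show 2 * (m + 1) = (2 * m + 1) + 1 by omega, List.range_succ, List.range_succ,
      List.range_succ, List.flatMap_append, ← ih]
    simp

-- the list of temps, in mask order, IS B's recursive product list
theorem pvMap_temp_eq_build (addr : List String) :
    (List.range (1 <<< addr.length)).map (fun mask => pvTemp mask addr) = pvBuild addr := by
  induction addr with
  | nil => rfl
  | cons x rest ih =>
    have hlen : (1 : Nat) <<< (x :: rest).length = 2 * (1 <<< rest.length) := by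
      simp [Nat.one_shiftLeft]; ring
    rw [hlen, pvRange_double, List.map_flatMap]
    show (List.range (1 <<< rest.length)).flatMap
        (fun q => [pvTemp (2 * q) (x :: rest), pvTemp (2 * q + 1) (x :: rest)]) = _
    simp only [pvTemp_even, pvTemp_odd]
    rw [show pvBuild (x :: rest) = (pvBuild rest).flatMap (fun v => [x :: v, "null" :: v]) from rfl,
      ← ih, List.flatMap_map]

-- ===== VERDICT (by name: the statement is the Claim_ definition above) =====
theorem generate_wildcard_variations_spec : Claim_equal_generate_wildcard_variations := by
  intro address _
  show generate_wildcard_variations address = generate_wildcard_variations_alt address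
  unfold generate_wildcard_variations generate_wildcard_variations_alt
  rw [← pvMap_temp_eq_build, PySem.Set.ofList_eq_foldl, List.foldl_map]
  rfl
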